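-- pv_equiv track=rewrite | github.com/adhin08/RealFlow_AI | src/metadata_utils.py | infer_desired_categories_from_query
-- ===== SOURCE A (Python) =====
-- from typing import List, Dict, Any, Set
--
-- def infer_desired_categories_from_query(query: str) -> List[str]:
--     """
--     Infers what categories a query might be looking for.
--     Used for category-based reranking.
--
--     Args:
--         query: The user's natural language query
--
--     Returns:
--         List of desired category IDs
--     """
--     q = query.lower()
--     desired: Set[str] = set()
--
--     # Error handling / monitoring
--     if any(word in q for word in ["error", "fail", "failure", "exception", "retry", "alert"]):
--         desired.add("error-handling")
--
--     # Lead processing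
--     if any(word in q for word in ["lead", "signup", "prospect", "contact", "crm"]):
--         desired.add("lead-processing")
--
--     # File management
--     if any(word in q for word in ["file", "attachment", "pdf", "document", "upload", "download"]):
--         desired.add("file-management")
--
--     # Notification
--     if any(word in q for word in ["notify", "notification", "alert", "message"]):
--         desired.add("notification")
--
--     # Form processing
--     if any(word in q for word in ["form", "typeform", "submission", "response", "survey"]):
--         desired.add("form-processing")
--
--     # AI / Summary
--     if any(word in q for word in ["summary", "summarize", "openai", "ai ", " ai", "llm", "gpt", "classify", "generate"]):
--         desired.add("ai-summary")
--
--     # E-commerce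
--     if any(word in q for word in ["order", "shopify", "woocommerce", "product", "cart", "checkout"]):
--         desired.add("ecommerce")
--
--     # Data sync
--     if any(word in q for word in ["sync", "spreadsheet", "sheet", "row", "record", "database", "append"]):
--         desired.add("data-sync")
--
--     # Calendar
--     if any(word in q for word in ["calendar", "event", "meeting", "appointment"]):
--         desired.add("calendar")
--
--     # Scheduling
--     if any(word in q for word in ["schedule", "cron", "hourly", "daily", "weekly", "interval"]):
--         desired.add("scheduling")
--
--     # Support
--     if any(word in q for word in ["ticket", "support", "helpdesk", "zendesk"]):
--         desired.add("support")
--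
--     return sorted(list(desired))
-- ===== SOURCE B (Python) =====
-- # Position-driven scan with a first-character inverted index: instead of testing each
-- # keyword with `in`, walk the query once and at each position dispatch (by the current
-- # character) to the keywords that could start there, doing a prefix match.
-- _KEYWORD_PAIRS = [
--     ("error", "error-handling"), ("fail", "error-handling"), ("failure", "error-handling"),
--     ("exception", "error-handling"), ("retry", "error-handling"), ("alert", "error-handling"),
--     ("lead", "lead-processing"), ("signup", "lead-processing"), ("prospect", "lead-processing"),
--     ("contact", "lead-processing"), ("crm", "lead-processing"),
--     ("file", "file-management"), ("attachment", "file-management"), ("pdf", "file-management"),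
--     ("document", "file-management"), ("upload", "file-management"), ("download", "file-management"),
--     ("notify", "notification"), ("notification", "notification"), ("alert", "notification"),
--     ("message", "notification"),
--     ("form", "form-processing"), ("typeform", "form-processing"), ("submission", "form-processing"),
--     ("response", "form-processing"), ("survey", "form-processing"),
--     ("summary", "ai-summary"), ("summarize", "ai-summary"), ("openai", "ai-summary"),
--     ("ai ", "ai-summary"), (" ai", "ai-summary"), ("llm", "ai-summary"), ("gpt", "ai-summary"),
--     ("classify", "ai-summary"), ("generate", "ai-summary"),
--     ("order", "ecommerce"), ("shopify", "ecommerce"), ("woocommerce", "ecommerce"),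
--     ("product", "ecommerce"), ("cart", "ecommerce"), ("checkout", "ecommerce"),
--     ("sync", "data-sync"), ("spreadsheet", "data-sync"), ("sheet", "data-sync"),
--     ("row", "data-sync"), ("record", "data-sync"), ("database", "data-sync"), ("append", "data-sync"),
--     ("calendar", "calendar"), ("event", "calendar"), ("meeting", "calendar"), ("appointment", "calendar"),
--     ("schedule", "scheduling"), ("cron", "scheduling"), ("hourly", "scheduling"),
--     ("daily", "scheduling"), ("weekly", "scheduling"), ("interval", "scheduling"),
--     ("ticket", "support"), ("support", "support"), ("helpdesk", "support"), ("zendesk", "support"),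
-- ]
--
-- # inverted index: first character -> keywords (with their category) starting with it
-- _INDEX = {}
-- for _kw, _cat in _KEYWORD_PAIRS:
--     _INDEX[_kw[0]] = _INDEX.get(_kw[0], []) + [(_kw, _cat)]
--
--
-- def infer_desired_categories_from_query(query: str):
--     q = query.lower()
--     found = set()
--     for i, ch in enumerate(q):
--         for kw, cat in _INDEX.get(ch, []):
--             if q.startswith(kw, i):
--                 found.add(cat)
--     return sorted(found)
-- ===== Notes on version B (the rewrite author's own statement) =====
-- stated objective: alternative
-- what changed: Replaced the keyword-driven chain of `any(word in q)` substring tests with a single position-driven scan of the query that dispatches, via a first-character inverted index built from a flat (keyword, category) list, to prefix matches at each position.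
import Mathlib
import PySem

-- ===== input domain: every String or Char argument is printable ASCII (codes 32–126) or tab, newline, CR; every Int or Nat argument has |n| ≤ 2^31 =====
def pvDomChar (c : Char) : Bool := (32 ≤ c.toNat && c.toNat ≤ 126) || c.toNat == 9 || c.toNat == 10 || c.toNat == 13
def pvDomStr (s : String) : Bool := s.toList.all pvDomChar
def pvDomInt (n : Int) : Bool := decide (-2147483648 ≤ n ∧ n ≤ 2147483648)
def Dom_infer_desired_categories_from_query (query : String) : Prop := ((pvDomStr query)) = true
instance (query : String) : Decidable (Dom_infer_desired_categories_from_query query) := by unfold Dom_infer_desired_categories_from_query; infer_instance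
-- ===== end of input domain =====

-- B replaces A's keyword-driven chain of `any(word in q)` tests by a single position-driven
-- scan of the query dispatching, via a first-character inverted index, to prefix matches
-- (objective: alternative algorithm/data structure).

-- ===== PORT A =====
def infer_desired_categories_from_query (query : String) : List String :=
  let q := PySem.Str.lower query
  let desired : PySem.Set String := PySem.Set.empty
  let desired := if (["error", "fail", "failure", "exception", "retry", "alert"].any (fun w => PySem.Str.isIn w q)) then PySem.Set.add desired "error-handling" else desired
  let desired := if (["lead", "signup", "prospect", "contact", "crm"].any (fun w => PySem.Str.isIn w q)) then PySem.Set.add desired "lead-processing" else desired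
  let desired := if (["file", "attachment", "pdf", "document", "upload", "download"].any (fun w => PySem.Str.isIn w q)) then PySem.Set.add desired "file-management" else desired
  let desired := if (["notify", "notification", "alert", "message"].any (fun w => PySem.Str.isIn w q)) then PySem.Set.add desired "notification" else desired
  let desired := if (["form", "typeform", "submission", "response", "survey"].any (fun w => PySem.Str.isIn w q)) then PySem.Set.add desired "form-processing" else desired
  let desired := if (["summary", "summarize", "openai", "ai ", " ai", "llm", "gpt", "classify", "generate"].any (fun w => PySem.Str.isIn w q)) then PySem.Set.add desired "ai-summary" else desired
  let desired := if (["order", "shopify", "woocommerce", "product", "cart", "checkout"].any (fun w => PySem.Str.isIn w q)) then PySem.Set.add desired "ecommerce" else desired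
  let desired := if (["sync", "spreadsheet", "sheet", "row", "record", "database", "append"].any (fun w => PySem.Str.isIn w q)) then PySem.Set.add desired "data-sync" else desired
  let desired := if (["calendar", "event", "meeting", "appointment"].any (fun w => PySem.Str.isIn w q)) then PySem.Set.add desired "calendar" else desired
  let desired := if (["schedule", "cron", "hourly", "daily", "weekly", "interval"].any (fun w => PySem.Str.isIn w q)) then PySem.Set.add desired "scheduling" else desired
  let desired := if (["ticket", "support", "helpdesk", "zendesk"].any (fun w => PySem.Str.isIn w q)) then PySem.Set.add desired "support" else desired
  PySem.List.sorted desired (fun x => x) false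

-- ===== PORT B =====
-- Source B's flat (keyword, category) list, in the same order
def pvKeywordPairs : List (String × String) :=
  [("error", "error-handling"), ("fail", "error-handling"), ("failure", "error-handling"),
   ("exception", "error-handling"), ("retry", "error-handling"), ("alert", "error-handling"),
   ("lead", "lead-processing"), ("signup", "lead-processing"), ("prospect", "lead-processing"),
   ("contact", "lead-processing"), ("crm", "lead-processing"),
   ("file", "file-management"), ("attachment", "file-management"), ("pdf", "file-management"),
   ("document", "file-management"), ("upload", "file-management"), ("download", "file-management"),
   ("notify", "notification"), ("notification", "notification"), ("alert", "notification"),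
   ("message", "notification"),
   ("form", "form-processing"), ("typeform", "form-processing"), ("submission", "form-processing"),
   ("response", "form-processing"), ("survey", "form-processing"),
   ("summary", "ai-summary"), ("summarize", "ai-summary"), ("openai", "ai-summary"),
   ("ai ", "ai-summary"), (" ai", "ai-summary"), ("llm", "ai-summary"), ("gpt", "ai-summary"),
   ("classify", "ai-summary"), ("generate", "ai-summary"),
   ("order", "ecommerce"), ("shopify", "ecommerce"), ("woocommerce", "ecommerce"),
   ("product", "ecommerce"), ("cart", "ecommerce"), ("checkout", "ecommerce"),
   ("sync", "data-sync"), ("spreadsheet", "data-sync"), ("sheet", "data-sync"),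
   ("row", "data-sync"), ("record", "data-sync"), ("database", "data-sync"), ("append", "data-sync"),
   ("calendar", "calendar"), ("event", "calendar"), ("meeting", "calendar"), ("appointment", "calendar"),
   ("schedule", "scheduling"), ("cron", "scheduling"), ("hourly", "scheduling"),
   ("daily", "scheduling"), ("weekly", "scheduling"), ("interval", "scheduling"),
   ("ticket", "support"), ("support", "support"), ("helpdesk", "support"), ("zendesk", "support")]

-- Source B's module-level index build: kw[0] ported as headD ' ' (exact: every keyword literal is nonempty)
def pvIndex : PySem.Dict Char (List (String × String)) :=
  pvKeywordPairs.foldl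
    (fun d x => PySem.Dict.insert d (x.1.toList.headD ' ') (PySem.Dict.getD d (x.1.toList.headD ' ') [] ++ [x]))
    PySem.Dict.empty

def infer_desired_categories_from_query_alt (query : String) : List String :=
  let q := PySem.Str.lower query
  -- q.startswith(kw, i) with 0 ≤ i ≤ len(q) is exactly a prefix match on q[i:]
  let found : PySem.Set String :=
    (PySem.List.enumerate q.toList 0).foldl
      (fun s ic =>
        (PySem.Dict.getD pvIndex ic.2 []).foldl
          (fun s p => if PySem.Chars.startswith (q.toList.drop ic.1.toNat) p.1.toList then PySem.Set.add s p.2 else s) s)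
      PySem.Set.empty
  PySem.List.sorted found (fun x => x) false

-- ===== PRECONDITION & SPEC =====
def Spec_infer_desired_categories_from_query (query : String) (out : List String) : Prop := out = infer_desired_categories_from_query_alt query
instance (query : String) (out : List String) : Decidable (Spec_infer_desired_categories_from_query query out) := by unfold Spec_infer_desired_categories_from_query; infer_instance

-- ===== CLAIM (what is proved, stated in full; the proofs are below) =====
def Claim_equal_infer_desired_categories_from_query : Prop := ∀ (query : String), Dom_infer_desired_categories_from_query query → Spec_infer_desired_categories_from_query query (infer_desired_categories_from_query query)

-- ===== LEMMAS AND PROOFS =====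

lemma pv_mem_add_ite {c : Bool} {s : PySem.Set String} {x a : String} :
    a ∈ (if c = true then PySem.Set.add s x else s) ↔ (c = true ∧ a = x) ∨ a ∈ s := by
  cases c <;> simp [PySem.Set.mem_add, or_comm]

lemma pv_nodup_add_ite {c : Bool} {s : PySem.Set String} {x : String} (h : s.Nodup) :
    (if c = true then PySem.Set.add s x else s).Nodup := by
  cases c
  · simpa using h
  · simpa using PySem.Set.nodup_add s x h

-- membership in the inner bucket loop of B
lemma pv_mem_inner (l : List (String × String)) (c : String × String → Bool)
    (s : PySem.Set String) (a : String) :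
    a ∈ l.foldl (fun s p => if c p then PySem.Set.add s p.2 else s) s ↔
      a ∈ s ∨ ∃ p ∈ l, c p = true ∧ a = p.2 := by
  induction l generalizing s with
  | nil => simp
  | cons x t ih =>
    simp only [List.foldl_cons, ih]
    by_cases hc : c x
    · simp [hc, PySem.Set.mem_add]
      tauto
    · simp [hc]

lemma pv_nodup_inner (l : List (String × String)) (c : String × String → Bool)
    (s : PySem.Set String) (h : s.Nodup) :
    (l.foldl (fun s p => if c p then PySem.Set.add s p.2 else s) s).Nodup := by
  induction l generalizing s with
  | nil => simpa using h
  | cons x t ih =>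
    simp only [List.foldl_cons]
    apply ih
    by_cases hc : c x <;> simp [hc]
    · exact PySem.Set.nodup_add s x.2 h
    · exact h

-- membership in the outer scan loop of B
lemma pv_mem_outer (L : List (Int × Char)) (g : Int × Char → List (String × String))
    (c : Int × Char → String × String → Bool) (s : PySem.Set String) (a : String) :
    a ∈ L.foldl (fun s ic => (g ic).foldl (fun s p => if c ic p then PySem.Set.add s p.2 else s) s) s ↔
      a ∈ s ∨ ∃ ic ∈ L, ∃ p ∈ g ic, c ic p = true ∧ a = p.2 := by
  induction L generalizing s with
  | nil => simp
  | cons x t ih =>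
    simp only [List.foldl_cons, ih, pv_mem_inner, List.exists_mem_cons_iff]
    rw [or_assoc]

lemma pv_nodup_outer (L : List (Int × Char)) (g : Int × Char → List (String × String))
    (c : Int × Char → String × String → Bool) (s : PySem.Set String) (h : s.Nodup) :
    (L.foldl (fun s ic => (g ic).foldl (fun s p => if c ic p then PySem.Set.add s p.2 else s) s) s).Nodup := by
  induction L generalizing s with
  | nil => simpa using h
  | cons x t ih =>
    simp only [List.foldl_cons]
    exact ih _ (pv_nodup_inner _ _ _ h)

-- the setdefault-style index build: bucket membership
lemma pv_mem_build (l : List (String × String)) (d : PySem.Dict Char (List (String × String)))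
    (ch : Char) (p : String × String) :
    p ∈ PySem.Dict.getD
        (l.foldl (fun d x => PySem.Dict.insert d (x.1.toList.headD ' ') (PySem.Dict.getD d (x.1.toList.headD ' ') [] ++ [x])) d)
        ch [] ↔
      p ∈ PySem.Dict.getD d ch [] ∨ (p ∈ l ∧ p.1.toList.headD ' ' = ch) := by
  induction l generalizing d with
  | nil => simp
  | cons x t ih =>
    simp only [List.foldl_cons, ih, PySem.Dict.getD_insert, List.mem_cons]
    by_cases hk : ch = x.1.toList.headD ' '
    · subst hk
      rw [if_pos rfl]
      constructor
      · rintro (h | ⟨ht, hkey⟩)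
        · rcases List.mem_append.1 h with h | h
          · exact Or.inl h
          · simp only [List.mem_singleton] at h
            subst h
            exact Or.inr ⟨Or.inl rfl, rfl⟩
        · exact Or.inr ⟨Or.inr ht, hkey⟩
      · rintro (h | ⟨(rfl | ht), hkey⟩)
        · exact Or.inl (List.mem_append_left _ h)
        · exact Or.inl (List.mem_append_right _ (by simp))
        · exact Or.inr ⟨ht, hkey⟩
    · simp only [if_neg hk]
      constructor
      · rintro (h | ⟨ht, hkey⟩)
        · exact Or.inl h
        · exact Or.inr ⟨Or.inr ht, hkey⟩
      · rintro (h | ⟨(rfl | ht), hkey⟩)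
        · exact Or.inl h
        · exact (hk hkey.symm).elim
        · exact Or.inr ⟨ht, hkey⟩

lemma pv_mem_bucket (ch : Char) (p : String × String) :
    p ∈ PySem.Dict.getD pvIndex ch [] ↔ p ∈ pvKeywordPairs ∧ p.1.toList.headD ' ' = ch := by
  unfold pvIndex
  rw [pv_mem_build]
  simp [PySem.Dict.getD_empty]

-- position-driven prefix scan finds w iff w is a substring (w nonempty)
lemma pv_scan_iff (w qs : List Char) (hw : w ≠ []) :
    (∃ k, ∃ _ : k < qs.length, qs[k] = w.headD ' ' ∧ PySem.Chars.startswith (qs.drop k) w = true) ↔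
      PySem.Chars.isIn w qs = true := by
  rw [← PySem.Chars.exists_prefix_drop_iff_isIn]
  constructor
  · rintro ⟨k, hk, -, hs⟩
    exact ⟨k, (PySem.Chars.startswith_iff _ _).1 hs⟩
  · rintro ⟨j, hpre⟩
    obtain ⟨c, rest, rfl⟩ := List.exists_cons_of_ne_nil hw
    have hne : qs.drop j ≠ [] := by
      intro h0
      rw [h0] at hpre
      exact absurd (List.eq_nil_of_prefix_nil hpre) (by simp)
    have hj : j < qs.length := by
      by_contra hle
      exact hne (List.drop_eq_nil_of_le (by omega))
    have hhead : (qs.drop j).head? = some c := by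
      rcases hpre with ⟨t, ht⟩
      rw [← ht]; rfl
    have hget : qs[j] = c := by
      have h2 : qs[j]? = some c := by rw [← List.head?_drop]; exact hhead
      simpa [List.getElem?_eq_getElem hj] using h2
    exact ⟨j, hj, by simpa using hget, (PySem.Chars.startswith_iff _ _).2 hpre⟩

-- every keyword literal is nonempty
lemma pv_pairs_ne_nil : ∀ p ∈ pvKeywordPairs, p.1.toList ≠ [] := by decide

-- B's set membership, in keyword-driven form
lemma pv_mem_found (query : String) (a : String) :
    (a ∈ (PySem.List.enumerate (PySem.Str.lower query).toList 0).foldl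
        (fun s ic =>
          (PySem.Dict.getD pvIndex ic.2 []).foldl
            (fun s p => if PySem.Chars.startswith ((PySem.Str.lower query).toList.drop ic.1.toNat) p.1.toList then PySem.Set.add s p.2 else s) s)
        PySem.Set.empty) ↔
      ∃ p ∈ pvKeywordPairs, PySem.Chars.isIn p.1.toList (PySem.Str.lower query).toList = true ∧ a = p.2 := by
  set qs := (PySem.Str.lower query).toList with hqs
  rw [pv_mem_outer]
  simp only [PySem.Set.empty, List.not_mem_nil, false_or]
  constructor
  · rintro ⟨ic, hic, p, hp, hcond, ha⟩
    rw [PySem.List.mem_enumerate_iff] at hic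
    obtain ⟨k, hk, rfl⟩ := hic
    rw [pv_mem_bucket] at hp
    obtain ⟨hpmem, hkey⟩ := hp
    refine ⟨p, hpmem, ?_, ha⟩
    rw [← pv_scan_iff p.1.toList qs (pv_pairs_ne_nil p hpmem)]
    refine ⟨k, hk, by simpa using hkey.symm, ?_⟩
    simpa using hcond
  · rintro ⟨p, hpmem, hin, ha⟩
    rw [← pv_scan_iff p.1.toList qs (pv_pairs_ne_nil p hpmem)] at hin
    obtain ⟨k, hk, hkey, hs⟩ := hin
    refine ⟨(0 + (k : Int), qs[k]), ?_, p, ?_, ?_, ha⟩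
    · rw [PySem.List.mem_enumerate_iff]; exact ⟨k, hk, rfl⟩
    · rw [pv_mem_bucket]; exact ⟨hpmem, hkey.symm⟩
    · simpa using hs

-- a keyword group as a slice of the pair list
lemma pv_group (ws : List String) (c : String) (qs : List Char) (a : String) :
    (∃ p ∈ ws.map (fun w => (w, c)), PySem.Chars.isIn p.1.toList qs = true ∧ a = p.2) ↔
      (∃ w ∈ ws, PySem.Chars.isIn w.toList qs = true) ∧ a = c := by
  constructor
  · rintro ⟨p, hp, hP, ha⟩
    rw [List.mem_map] at hp
    obtain ⟨w, hw, rfl⟩ := hp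
    exact ⟨⟨w, hw, hP⟩, ha⟩
  · rintro ⟨⟨w, hw, hP⟩, ha⟩
    exact ⟨(w, c), List.mem_map_of_mem hw, hP, ha⟩

lemma pv_pairs_groups : pvKeywordPairs =
    (["error", "fail", "failure", "exception", "retry", "alert"].map (fun w => (w, "error-handling"))) ++
    (["lead", "signup", "prospect", "contact", "crm"].map (fun w => (w, "lead-processing"))) ++
    (["file", "attachment", "pdf", "document", "upload", "download"].map (fun w => (w, "file-management"))) ++
    (["notify", "notification", "alert", "message"].map (fun w => (w, "notification"))) ++
    (["form", "typeform", "submission", "response", "survey"].map (fun w => (w, "form-processing"))) ++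
    (["summary", "summarize", "openai", "ai ", " ai", "llm", "gpt", "classify", "generate"].map (fun w => (w, "ai-summary"))) ++
    (["order", "shopify", "woocommerce", "product", "cart", "checkout"].map (fun w => (w, "ecommerce"))) ++
    (["sync", "spreadsheet", "sheet", "row", "record", "database", "append"].map (fun w => (w, "data-sync"))) ++
    (["calendar", "event", "meeting", "appointment"].map (fun w => (w, "calendar"))) ++
    (["schedule", "cron", "hourly", "daily", "weekly", "interval"].map (fun w => (w, "scheduling"))) ++
    (["ticket", "support", "helpdesk", "zendesk"].map (fun w => (w, "support"))) := by
  rfl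

-- ===== VERDICT (by name: the statement is the Claim_ definition above) =====
set_option maxHeartbeats 2000000 in
theorem infer_desired_categories_from_query_spec : Claim_equal_infer_desired_categories_from_query := by
  intro query _
  unfold Spec_infer_desired_categories_from_query infer_desired_categories_from_query infer_desired_categories_from_query_alt
  simp only []
  rw [PySem.List.sorted_id_eq_sorted_id_iff_perm]
  refine (List.perm_ext_iff_of_nodup ?_ ?_).2 ?_
  · repeat' apply pv_nodup_add_ite
    exact List.nodup_nil
  · exact pv_nodup_outer _ _ _ _ List.nodup_nil
  · intro a
    rw [pv_mem_found query a, pv_pairs_groups]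
    simp only [pv_mem_add_ite, PySem.Set.empty, List.not_mem_nil, or_false]
    have hsplit : ∀ (l₁ l₂ : List (String × String)) (Q : String × String → Prop),
        (∃ p ∈ l₁ ++ l₂, Q p) ↔ (∃ p ∈ l₁, Q p) ∨ (∃ p ∈ l₂, Q p) := by
      intro l₁ l₂ Q
      constructor
      · rintro ⟨p, hp, hq⟩
        rw [List.mem_append] at hp
        rcases hp with h | h
        · exact Or.inl ⟨p, h, hq⟩
        · exact Or.inr ⟨p, h, hq⟩
      · rintro (⟨p, hp, hq⟩ | ⟨p, hp, hq⟩)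
        · exact ⟨p, List.mem_append_left _ hp, hq⟩
        · exact ⟨p, List.mem_append_right _ hp, hq⟩
    simp only [hsplit, pv_group, List.any_eq_true, PySem.Str.isIn_eq]
    simp only [or_assoc]
    constructor
    · rintro (h | h | h | h | h | h | h | h | h | h | h)
      · exact Or.inr (Or.inr (Or.inr (Or.inr (Or.inr (Or.inr (Or.inr (Or.inr (Or.inr (Or.inr (h))))))))))
      · exact Or.inr (Or.inr (Or.inr (Or.inr (Or.inr (Or.inr (Or.inr (Or.inr (Or.inr (Or.inl h)))))))))
      · exact Or.inr (Or.inr (Or.inr (Or.inr (Or.inr (Or.inr (Or.inr (Or.inr (Or.inl h))))))))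
      · exact Or.inr (Or.inr (Or.inr (Or.inr (Or.inr (Or.inr (Or.inr (Or.inl h)))))))
      · exact Or.inr (Or.inr (Or.inr (Or.inr (Or.inr (Or.inr (Or.inl h))))))
      · exact Or.inr (Or.inr (Or.inr (Or.inr (Or.inr (Or.inl h)))))
      · exact Or.inr (Or.inr (Or.inr (Or.inr (Or.inl h))))
      · exact Or.inr (Or.inr (Or.inr (Or.inl h)))
      · exact Or.inr (Or.inr (Or.inl h))
      · exact Or.inr (Or.inl h)
      · exact Or.inl h
    · rintro (h | h | h | h | h | h | h | h | h | h | h)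
      · exact Or.inr (Or.inr (Or.inr (Or.inr (Or.inr (Or.inr (Or.inr (Or.inr (Or.inr (Or.inr (h))))))))))
      · exact Or.inr (Or.inr (Or.inr (Or.inr (Or.inr (Or.inr (Or.inr (Or.inr (Or.inr (Or.inl h)))))))))
      · exact Or.inr (Or.inr (Or.inr (Or.inr (Or.inr (Or.inr (Or.inr (Or.inr (Or.inl h))))))))
      · exact Or.inr (Or.inr (Or.inr (Or.inr (Or.inr (Or.inr (Or.inr (Or.inl h)))))))
      · exact Or.inr (Or.inr (Or.inr (Or.inr (Or.inr (Or.inr (Or.inl h))))))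
      · exact Or.inr (Or.inr (Or.inr (Or.inr (Or.inr (Or.inl h)))))
      · exact Or.inr (Or.inr (Or.inr (Or.inr (Or.inl h))))
      · exact Or.inr (Or.inr (Or.inr (Or.inl h)))
      · exact Or.inr (Or.inr (Or.inl h))
      · exact Or.inr (Or.inl h)
      · exact Or.inl h
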